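-- pv_equiv track=rewrite | github.com/ForFer/Hackerrank-and-learning-bits | algorithms/search/radioTransmitters.py | search_next_index
-- ===== SOURCE A (Python) =====
-- def search_next_index(count, x, marked, n, k, h=0):
--     h_marked_index = -1
--     if h+1==n and marked[x[h]]==0:
--         marked[x[h]]=2
--         return n, count-1
--
--     for i in range(h, n-1):
--         xi = x[i]
--         temp = k
--         if i+k<len(x):
--             for j in range(i+k, i, -1):
--                 if x[j]-xi <= temp:
--                     marked[x[j]] = 2
--                     h_marked_index = j
--                     count-=1
--                     break
--                 else:
--                     continue
--         if h_marked_index != -1: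
--             marked[x[i]] = 1
--             count-=1
--             break
--     return h_marked_index, count
-- ===== SOURCE B (Python) =====
-- def search_next_index(count, x, marked, n, k, h=0):
--     # x is assumed sorted ascending (the radio-transmitters domain); instead of
--     # scanning the window downward element by element, probe the window's first
--     # element and binary-search the farthest in-range index.
--     if h + 1 == n and marked[x[h]] == 0:
--         marked[x[h]] = 2
--         return n, count - 1
--     if k > 0:
--         for i in range(h, n - 1):
--             if i + k < len(x) and x[i + 1] - x[i] <= k:
--                 limit = x[i] + k
--                 lo, hi = i + 1, i + k  # x[lo] <= limit; find last index with x[.] <= limit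
--                 while lo < hi:
--                     mid = (lo + hi + 1) // 2
--                     if x[mid] <= limit:
--                         lo = mid
--                     else:
--                         hi = mid - 1
--                 marked[x[lo]] = 2
--                 marked[x[i]] = 1
--                 return lo, count - 2
--     return -1, count
-- ===== Notes on version B (the rewrite author's own statement) =====
-- stated objective: alternative
-- what changed: Instead of A's element-by-element downward scan of every window, B tests the window's first element once and, on a hit, locates the farthest in-range index with a hand-written binary search (x sorted ascending, the radio-transmitters domain stated in Pre_); it trades A's repeated linear window scans for a single probe plus a logarithmic search.
-- outside the precondition, e.g. on search_next_index(0, [0, 3, 1], [0, 0, 0, 0], 3, 2, 0): A returns (2, -2), B returns (-1, 0); on search_next_index(0, [0, 5], [0], 2, 1, 0): A returns (-1, 0), B returns (-1, 0)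
import Mathlib
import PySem

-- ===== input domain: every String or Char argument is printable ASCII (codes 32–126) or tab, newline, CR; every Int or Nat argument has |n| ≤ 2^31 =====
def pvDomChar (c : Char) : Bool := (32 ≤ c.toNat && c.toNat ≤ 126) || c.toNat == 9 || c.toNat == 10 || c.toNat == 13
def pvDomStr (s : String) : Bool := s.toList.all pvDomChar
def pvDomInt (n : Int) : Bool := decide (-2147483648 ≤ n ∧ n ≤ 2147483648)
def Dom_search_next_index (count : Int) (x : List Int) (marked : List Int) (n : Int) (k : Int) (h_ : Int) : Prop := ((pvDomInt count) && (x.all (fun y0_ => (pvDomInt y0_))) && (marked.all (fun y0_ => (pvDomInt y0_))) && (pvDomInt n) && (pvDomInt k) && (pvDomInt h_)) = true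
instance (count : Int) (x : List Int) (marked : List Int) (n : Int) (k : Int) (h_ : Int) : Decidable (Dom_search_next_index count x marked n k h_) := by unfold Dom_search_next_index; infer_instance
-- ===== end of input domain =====

-- B replaces A's element-by-element downward window scan by one probe of the window's first
-- element plus a hand-written binary search for the farthest in-range index (valid on the
-- sorted-x domain stated in Pre_);
-- equivalence is about the RETURN value: both Pythons mutate `marked` (identically on Pre_),
-- and those writes are never read back, so the ports omit them.


-- ===== PORT A =====
-- inner 'for j in range(i+k, i, -1)': first j (from the top) with x[j]-xi <= temp;
-- the write marked[x[j]] = 2 is a side effect never read again and is omitted (see header).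
def snInner (x : List Int) (temp xi : Int) (hmi c : Int) : List Int → Int × Int
  | [] => (hmi, c)
  | j :: rest =>
      if PySem.List.pyGetD x j 0 - xi ≤ temp then (j, c - 1)
      else snInner x temp xi hmi c rest

-- outer 'for i in range(h, n-1)' with the break-on-found flag h_marked_index (hmi);
-- the writes marked[x[j]] = 2 / marked[x[i]] = 1 are side effects never read again, omitted.
def snLoop (x : List Int) (k : Int) : List Int → Int → Int → Int × Int
  | [], hmi, c => (hmi, c)
  | i :: rest, hmi, c =>
      let xi := PySem.List.pyGetD x i 0
      let temp := k
      let p := if i + k < PySem.List.len x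
               then snInner x temp xi hmi c (PySem.List.pyRange (i + k) i (-1))
               else (hmi, c)
      if p.1 ≠ -1 then (p.1, p.2 - 1) else snLoop x k rest p.1 p.2

def search_next_index (count : Int) (x : List Int) (marked : List Int) (n : Int) (k : Int) (h_ : Int) : Int × Int :=
  if h_ + 1 = n ∧ PySem.List.pyGetD marked (PySem.List.pyGetD x h_ 0) 0 = 0 then
    (n, count - 1)
  else
    snLoop x k (PySem.List.pyRange h_ (n - 1) 1) (-1) count

-- ===== PORT B =====
-- hand-written binary search from Source B: largest index in [lo, hi] whose value is ≤ limit,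
-- given x[lo] ≤ limit (x sorted on Pre_).
def snBSearch (x : List Int) (limit lo hi : Int) : Int :=
  if hlt : lo < hi then
    let mid := PySem.Int.floordiv (lo + hi + 1) 2
    if PySem.List.pyGetD x mid 0 ≤ limit then snBSearch x limit mid hi
    else snBSearch x limit lo (mid - 1)
  else lo
termination_by (hi - lo).toNat
decreasing_by
  · have := @PySem.Int.floordiv_two_mid_bounds (lo + 1) hi (by omega)
    simp only [show lo + 1 + hi = lo + hi + 1 by ring] at this
    omega
  · have := @PySem.Int.floordiv_two_mid_bounds (lo + 1) hi (by omega)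
    simp only [show lo + 1 + hi = lo + hi + 1 by ring] at this
    omega

-- outer 'for i in range(h, n-1)' of Source B (runs only when k > 0): first i whose window is
-- inside x and whose nearest neighbour is in range; marked writes omitted as in port A.
def snLoopB (x : List Int) (k count : Int) : List Int → Int × Int
  | [] => (-1, count)
  | i :: rest =>
      if i + k < PySem.List.len x ∧ PySem.List.pyGetD x (i + 1) 0 - PySem.List.pyGetD x i 0 ≤ k then
        (snBSearch x (PySem.List.pyGetD x i 0 + k) (i + 1) (i + k), count - 2)
      else snLoopB x k count rest

def search_next_index_alt (count : Int) (x : List Int) (marked : List Int) (n : Int) (k : Int) (h_ : Int) : Int × Int :=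
  if h_ + 1 = n ∧ PySem.List.pyGetD marked (PySem.List.pyGetD x h_ 0) 0 = 0 then
    (n, count - 1)
  else if 0 < k then
    snLoopB x k count (PySem.List.pyRange h_ (n - 1) 1)
  else
    (-1, count)

-- ===== PRECONDITION & SPEC =====
-- Pre_ admits (a) the degenerate inputs where the scan loop is empty (n ≤ h+1, with the
-- single-element branch's two indexings in range when it fires), and (b) the problem's
-- natural domain (radio transmitters): x sorted ascending, 0 ≤ h, n ≤ len(x), every value
-- of x a valid index into marked. Outside it A can raise IndexError, on unsorted x A's
-- downward-scan value is an accident of traversal order, and the conservative bounds of (b)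
-- also drop some inputs whose loop runs but never touches the out-of-range value — see the
-- cited examples.
def Pre_search_next_index (count : Int) (x : List Int) (marked : List Int) (n : Int) (k : Int) (h_ : Int) : Prop :=
  (n ≤ h_ + 1 ∧ (h_ + 1 = n → PySem.Raise.InRange x.length h_ ∧
      PySem.Raise.InRange marked.length (PySem.List.pyGetD x h_ 0)))
  ∨ (x.Pairwise (· ≤ ·) ∧ 0 ≤ h_ ∧ n ≤ (x.length : Int) ∧ ∀ v ∈ x, 0 ≤ v ∧ v < (marked.length : Int))
instance (count : Int) (x : List Int) (marked : List Int) (n : Int) (k : Int) (h_ : Int) : Decidable (Pre_search_next_index count x marked n k h_) := by unfold Pre_search_next_index; infer_instance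

def pvWitness_search_next_index : Int × List Int × List Int × Int × Int × Int := (0, [0, 2], [0, 0, 0], 2, 1, 0)

def Spec_search_next_index (count : Int) (x : List Int) (marked : List Int) (n : Int) (k : Int) (h_ : Int) (out : Int × Int) : Prop := out = search_next_index_alt count x marked n k h_
instance (count : Int) (x : List Int) (marked : List Int) (n : Int) (k : Int) (h_ : Int) (out : Int × Int) : Decidable (Spec_search_next_index count x marked n k h_ out) := by unfold Spec_search_next_index; infer_instance

-- ===== CLAIM (what is proved, stated in full; the proofs are below) =====
def Claim_equal_search_next_index : Prop := ∀ (count : Int) (x : List Int) (marked : List Int) (n : Int) (k : Int) (h_ : Int), Dom_search_next_index count x marked n k h_ → Pre_search_next_index count x marked n k h_ → Spec_search_next_index count x marked n k h_ (search_next_index count x marked n k h_)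

-- ===== LEMMAS AND PROOFS =====

-- sorted x read through pyGetD is monotone on valid indices
lemma pyGetD_mono (x : List Int) (hs : x.Pairwise (· ≤ ·)) (j j' : Int)
    (h0 : 0 ≤ j) (hjj : j ≤ j') (hj' : j' < (x.length : Int)) :
    PySem.List.pyGetD x j 0 ≤ PySem.List.pyGetD x j' 0 := by
  rcases eq_or_lt_of_le hjj with rfl | hlt
  · exact le_refl _
  · rw [PySem.List.pyGetD_eq_getElem x 0 h0 (by omega),
        PySem.List.pyGetD_eq_getElem x 0 (by omega) hj']
    exact List.pairwise_iff_getElem.mp hs j.toNat j'.toNat (by omega) (by omega) (by omega)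

-- with k ≤ 0 every inner range is empty, so A's loop never finds anything
lemma snLoop_of_k_nonpos (x : List Int) (k : Int) (hk : k ≤ 0) :
    ∀ (L : List Int) (c : Int), snLoop x k L (-1) c = (-1, c) := by
  intro L
  induction L with
  | nil => intro c; rfl
  | cons i rest ih =>
      intro c
      simp only [snLoop]
      rw [PySem.List.pyRange_neg_one_eq_nil (by omega : i + k ≤ i)]
      simp [snInner, ih c]

-- inner scan when no element of the range qualifies
lemma snInner_no_hit (x : List Int) (temp xi hmi c : Int) (L : List Int)
    (h : ∀ j ∈ L, ¬ PySem.List.pyGetD x j 0 - xi ≤ temp) :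
    snInner x temp xi hmi c L = (hmi, c) := by
  induction L with
  | nil => rfl
  | cons j rest ih =>
      simp only [snInner]
      rw [if_neg (h j (List.mem_cons_self))]
      exact ih fun j' hj' => h j' (List.mem_cons_of_mem _ hj')

-- the "farthest in-range index" spec both searches satisfy
def FarSpec (x : List Int) (limit i hi r : Int) : Prop :=
  i + 1 ≤ r ∧ r ≤ hi ∧ PySem.List.pyGetD x r 0 ≤ limit ∧
    (r = hi ∨ ¬ PySem.List.pyGetD x (r + 1) 0 ≤ limit)

lemma farSpec_unique (x : List Int) (hs : x.Pairwise (· ≤ ·)) (limit i hi r r' : Int)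
    (h0 : 0 ≤ i) (hhi : hi < (x.length : Int))
    (h1 : FarSpec x limit i hi r) (h2 : FarSpec x limit i hi r') : r = r' := by
  obtain ⟨a1, b1, c1, d1⟩ := h1
  obtain ⟨a2, b2, c2, d2⟩ := h2
  rcases lt_trichotomy r r' with hlt | heq | hgt
  · rcases d1 with rfl | hnp
    · omega
    · exact absurd (le_trans (pyGetD_mono x hs (r + 1) r' (by omega) (by omega) (by omega)) c2) hnp
  · exact heq
  · rcases d2 with rfl | hnp
    · omega
    · exact absurd (le_trans (pyGetD_mono x hs (r' + 1) r (by omega) (by omega) (by omega)) c1) hnp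

-- A's downward scan satisfies FarSpec (and decrements count once)
lemma snInner_spec (x : List Int) (k xi hmi c i : Int) :
    ∀ (N : Nat) (a : Int), (a - i).toNat ≤ N → i < a →
      PySem.List.pyGetD x (i + 1) 0 - xi ≤ k →
      ∃ r, snInner x k xi hmi c (PySem.List.pyRange a i (-1)) = (r, c - 1) ∧
        FarSpec x (xi + k) i a r := by
  intro N
  induction N with
  | zero => intro a hN hia _; omega
  | succ N ih =>
      intro a hN hia hbot
      rw [PySem.List.pyRange_neg_one_cons hia]
      simp only [snInner]
      by_cases hhit : PySem.List.pyGetD x a 0 - xi ≤ k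
      · exact ⟨a, by rw [if_pos hhit], by omega, le_refl a, by omega, Or.inl rfl⟩
      · rw [if_neg hhit]
        have hia' : i < a - 1 := by
          rcases eq_or_lt_of_le (by omega : i + 1 ≤ a) with heq | h
          · exact absurd (heq ▸ hbot) hhit
          · omega
        obtain ⟨r, hr, s1, s2, s3, s4⟩ := ih (a - 1) (by omega) hia' hbot
        refine ⟨r, hr, s1, by omega, s3, ?_⟩
        rcases s4 with rfl | hnp
        · refine Or.inr ?_
          rw [show a - 1 + 1 = a by ring]
          omega
        · exact Or.inr hnp

-- B's binary search satisfies FarSpec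
lemma snBSearch_spec (x : List Int) (limit i W : Int) :
    ∀ (N : Nat) (lo hi : Int), (hi - lo).toNat ≤ N → i + 1 ≤ lo → lo ≤ hi → hi ≤ W →
      PySem.List.pyGetD x lo 0 ≤ limit →
      (hi = W ∨ ¬ PySem.List.pyGetD x (hi + 1) 0 ≤ limit) →
      FarSpec x limit i W (snBSearch x limit lo hi) := by
  intro N
  induction N with
  | zero =>
      intro lo hi hN hlo hlohi hW hP hend
      have heq : lo = hi := by omega
      rw [snBSearch, dif_neg (by omega : ¬ lo < hi)]
      exact ⟨hlo, by omega, hP, by rw [heq]; exact hend⟩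
  | succ N ih =>
      intro lo hi hN hlo hlohi hW hP hend
      rw [snBSearch]
      by_cases hlt : lo < hi
      · rw [dif_pos hlt]
        have hmid := @PySem.Int.floordiv_two_mid_bounds (lo + 1) hi (by omega)
        rw [show lo + 1 + hi = lo + hi + 1 by ring] at hmid
        by_cases hPm : PySem.List.pyGetD x (PySem.Int.floordiv (lo + hi + 1) 2) 0 ≤ limit
        · rw [if_pos hPm]
          exact ih _ hi (by omega) (by omega) (by omega) hW hPm hend
        · rw [if_neg hPm]
          refine ih lo _ (by omega) hlo (by omega) (by omega) hP (Or.inr ?_)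
          rw [show PySem.Int.floordiv (lo + hi + 1) 2 - 1 + 1 = PySem.Int.floordiv (lo + hi + 1) 2 by ring]
          exact hPm
      · rw [dif_neg hlt]
        have heq : lo = hi := by omega
        exact ⟨hlo, by omega, hP, by rw [heq]; exact hend⟩

-- A's loop equals B's loop on a list of valid indices (k > 0, x sorted)
lemma snLoop_eq_snLoopB (x : List Int) (k : Int) (hk : 0 < k) (hs : x.Pairwise (· ≤ ·)) :
    ∀ (L : List Int) (c : Int), (∀ i ∈ L, 0 ≤ i ∧ i + 1 < (x.length : Int)) →
      snLoop x k L (-1) c = snLoopB x k c L := by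
  intro L
  induction L with
  | nil => intro c _; rfl
  | cons i rest ih =>
      intro c hval
      obtain ⟨hi0, hi1⟩ := hval i (List.mem_cons_self)
      have hrest := fun j hj => hval j (List.mem_cons_of_mem _ hj)
      simp only [snLoop, snLoopB, PySem.List.len_eq]
      by_cases hwin : i + k < (x.length : Int)
      · by_cases hnear : PySem.List.pyGetD x (i + 1) 0 - PySem.List.pyGetD x i 0 ≤ k
        · obtain ⟨r, hr, hspec⟩ := snInner_spec x k (PySem.List.pyGetD x i 0) (-1) c i
            ((i + k - i).toNat) (i + k) (le_refl _) (by omega) hnear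
          have hspecB := snBSearch_spec x (PySem.List.pyGetD x i 0 + k) i (i + k)
            ((i + k - (i + 1)).toNat) (i + 1) (i + k) (le_refl _) (le_refl _) (by omega)
            (le_refl _) (by omega) (Or.inl rfl)
          have hreq := farSpec_unique x hs (PySem.List.pyGetD x i 0 + k) i (i + k) r
            (snBSearch x (PySem.List.pyGetD x i 0 + k) (i + 1) (i + k)) hi0 hwin hspec hspecB
          have hr1 : ((r, c - 1) : Int × Int).1 ≠ -1 := by
            have := hspec.1; simp only []; omega
          rw [if_pos hwin, hr, if_pos hr1,
              if_pos (show i + k < ((x.length : Nat) : Int) ∧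
                PySem.List.pyGetD x (i + 1) 0 - PySem.List.pyGetD x i 0 ≤ k from ⟨hwin, hnear⟩)]
          refine Prod.ext ?_ ?_
          · simpa using hreq
          · simp only []
            ring
        · rw [if_pos hwin, snInner_no_hit x k _ (-1) c _ ?nohit]
          · rw [if_neg (show ¬ (((-1 : Int), c).1 ≠ -1) by simp),
                if_neg (show ¬ (i + k < ((x.length : Nat) : Int) ∧
                  PySem.List.pyGetD x (i + 1) 0 - PySem.List.pyGetD x i 0 ≤ k) from
                  fun hc => hnear hc.2)]
            exact ih c hrest
          case nohit =>
            intro j hj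
            rw [PySem.List.mem_pyRange_neg_one] at hj
            have hmono := pyGetD_mono x hs (i + 1) j (by omega) (by omega) (by omega)
            omega
      · rw [if_neg hwin, if_neg (show ¬ (((-1 : Int), c).1 ≠ -1) by simp),
            if_neg (show ¬ (i + k < ((x.length : Nat) : Int) ∧
              PySem.List.pyGetD x (i + 1) 0 - PySem.List.pyGetD x i 0 ≤ k) from
              fun hc => hwin hc.1)]
        exact ih c hrest

-- ===== VERDICT (by name: the statement is the Claim_ definition above) =====
theorem search_next_index_spec : Claim_equal_search_next_index := by
  intro count x marked n k h_ _hdom hpre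
  rcases hpre with ⟨htriv, -⟩ | ⟨hs, hh, hn, _hm⟩
  · show search_next_index count x marked n k h_ = search_next_index_alt count x marked n k h_
    simp only [search_next_index, search_next_index_alt]
    by_cases hc : h_ + 1 = n ∧ PySem.List.pyGetD marked (PySem.List.pyGetD x h_ 0) 0 = 0
    · rw [if_pos hc, if_pos hc]
    · rw [if_neg hc, if_neg hc, PySem.List.pyRange_one_eq_nil (by omega : n - 1 ≤ h_)]
      by_cases hk : 0 < k
      · rw [if_pos hk]; rfl
      · rw [if_neg hk]; rfl
  show search_next_index count x marked n k h_ = search_next_index_alt count x marked n k h_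
  simp only [search_next_index, search_next_index_alt]
  by_cases hc : h_ + 1 = n ∧ PySem.List.pyGetD marked (PySem.List.pyGetD x h_ 0) 0 = 0
  · rw [if_pos hc, if_pos hc]
  · rw [if_neg hc, if_neg hc]
    by_cases hk : 0 < k
    · rw [if_pos hk]
      refine snLoop_eq_snLoopB x k hk hs _ count fun i hi => ?_
      rw [PySem.List.mem_pyRange_one] at hi
      omega
    · rw [if_neg hk]
      exact snLoop_of_k_nonpos x k (by omega) _ count
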